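-- pv_equiv track=rewrite | github.com/mrainone7p/Media-themes | web/logic.py | find_row_by_identity
-- ===== SOURCE A (Python) =====
-- def find_row_by_identity(rows: list[dict], rating_key: str = "", folder: str = "", tmdb_id: str = ""):
--     rating_key = str(rating_key or "").strip()
--     folder = str(folder or "").strip()
--     tmdb_id = str(tmdb_id or "").strip()
--     if rating_key:
--         row = next((row for row in rows if str(row.get("rating_key", "") or "").strip() == rating_key), None)
--         if row:
--             return row, "rating_key"
--     if folder:
--         row = next((row for row in rows if str(row.get("folder", "") or "").strip() == folder), None)
--         if row:
--             return row, "folder"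
--     if tmdb_id:
--         row = next((row for row in rows if str(row.get("tmdb_id", "") or "").strip() == tmdb_id), None)
--         if row:
--             return row, "tmdb_id"
--     return None, ""
-- ===== SOURCE B (Python) =====
-- def find_row_by_identity(rows: list[dict], rating_key: str = "", folder: str = "", tmdb_id: str = ""):
--     rating_key = str(rating_key or "").strip()
--     folder = str(folder or "").strip()
--     tmdb_id = str(tmdb_id or "").strip()
--     m_rk = m_fo = m_ti = None
--     # single pass: record the first row matching each (non-empty) field query
--     for row in rows:
--         if m_rk is None and rating_key and str(row.get("rating_key", "") or "").strip() == rating_key: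
--             m_rk = row
--         if m_fo is None and folder and str(row.get("folder", "") or "").strip() == folder:
--             m_fo = row
--         if m_ti is None and tmdb_id and str(row.get("tmdb_id", "") or "").strip() == tmdb_id:
--             m_ti = row
--     if m_rk is not None:
--         return m_rk, "rating_key"
--     if m_fo is not None:
--         return m_fo, "folder"
--     if m_ti is not None:
--         return m_ti, "tmdb_id"
--     return None, ""
-- ===== Notes on version B (the rewrite author's own statement) =====
-- stated objective: alternative
-- what changed: Replaces A's three staged linear scans (one generator scan per field, stopping at the first hit) with a single pass over the rows that accumulates the first match for each of the three fields simultaneously, followed by one priority check on the three accumulators.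
import Mathlib
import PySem

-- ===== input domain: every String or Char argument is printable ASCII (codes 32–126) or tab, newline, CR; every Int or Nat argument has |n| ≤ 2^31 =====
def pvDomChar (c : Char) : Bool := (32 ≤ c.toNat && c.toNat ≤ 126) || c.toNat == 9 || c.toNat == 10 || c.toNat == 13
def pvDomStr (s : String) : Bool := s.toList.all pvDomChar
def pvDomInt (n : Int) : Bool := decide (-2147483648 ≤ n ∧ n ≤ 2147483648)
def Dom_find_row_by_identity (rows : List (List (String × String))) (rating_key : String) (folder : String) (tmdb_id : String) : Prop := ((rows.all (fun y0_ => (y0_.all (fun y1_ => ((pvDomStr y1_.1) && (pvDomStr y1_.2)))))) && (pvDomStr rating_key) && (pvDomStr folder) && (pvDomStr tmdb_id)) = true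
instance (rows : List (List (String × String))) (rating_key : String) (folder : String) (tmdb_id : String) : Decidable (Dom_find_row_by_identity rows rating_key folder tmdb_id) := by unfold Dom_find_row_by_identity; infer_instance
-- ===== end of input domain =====

-- B makes ONE pass over the rows, accumulating the first match for each of the three fields
-- simultaneously, instead of A's three staged per-field scans; alternative structure, same cost class.
-- ===== PORT A =====
-- field lookup inside one row: str(row.get(field, "") or "").strip()
def pvRowKey (row : List (String × String)) (field : String) : String :=
  PySem.Str.strip ((PySem.Dict.mk row).getD field "")

-- one "if q: row = next(...); if row: return row, field" block of A; cont = the code after it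
def pvTryScan (rows : List (List (String × String))) (field : String) (q : String)
    (cont : (Option (List (String × String))) × String) : (Option (List (String × String))) × String :=
  if q != "" then
    match rows.find? (fun row => pvRowKey row field == q) with
    | some row => if row.isEmpty then cont else (some row, field)
    | none => cont
  else cont

def find_row_by_identity (rows : List (List (String × String))) (rating_key : String) (folder : String) (tmdb_id : String) : (Option (List (String × String))) × String :=
  let rk := PySem.Str.strip rating_key
  let fo := PySem.Str.strip folder
  let ti := PySem.Str.strip tmdb_id
  pvTryScan rows "rating_key" rk (pvTryScan rows "folder" fo (pvTryScan rows "tmdb_id" ti (none, "")))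

-- ===== PORT B =====
-- one "if m is None and q and str(row.get(f,"") or "").strip() == q: m = row" update of B's loop body
def pvUpd (field q : String) (m : Option (List (String × String))) (row : List (String × String)) :
    Option (List (String × String)) :=
  if m.isNone && (q != "") && (pvRowKey row field == q) then some row else m

def find_row_by_identity_alt (rows : List (List (String × String))) (rating_key : String) (folder : String) (tmdb_id : String) : (Option (List (String × String))) × String :=
  let rk := PySem.Str.strip rating_key
  let fo := PySem.Str.strip folder
  let ti := PySem.Str.strip tmdb_id
  let acc := rows.foldl
    (fun acc row =>
      (pvUpd "rating_key" rk acc.1 row, pvUpd "folder" fo acc.2.1 row, pvUpd "tmdb_id" ti acc.2.2 row))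
    (none, none, none)
  match acc.1 with
  | some r => (some r, "rating_key")
  | none =>
    match acc.2.1 with
    | some r => (some r, "folder")
    | none =>
      match acc.2.2 with
      | some r => (some r, "tmdb_id")
      | none => (none, "")

-- ===== PRECONDITION & SPEC =====
def Spec_find_row_by_identity (rows : List (List (String × String))) (rating_key : String) (folder : String) (tmdb_id : String) (out : (Option (List (String × String))) × String) : Prop := out = find_row_by_identity_alt rows rating_key folder tmdb_id
instance (rows : List (List (String × String))) (rating_key : String) (folder : String) (tmdb_id : String) (out : (Option (List (String × String))) × String) : Decidable (Spec_find_row_by_identity rows rating_key folder tmdb_id out) := by unfold Spec_find_row_by_identity; infer_instance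

-- ===== CLAIM (what is proved, stated in full; the proofs are below) =====
def Claim_equal_find_row_by_identity : Prop := ∀ (rows : List (List (String × String))) (rating_key : String) (folder : String) (tmdb_id : String), Dom_find_row_by_identity rows rating_key folder tmdb_id → Spec_find_row_by_identity rows rating_key folder tmdb_id (find_row_by_identity rows rating_key folder tmdb_id)

-- ===== LEMMAS AND PROOFS =====

-- the triple fold is three independent single-field folds
theorem pvFold_proj (rows : List (List (String × String))) (rk fo ti : String)
    (a b c : Option (List (String × String))) :
    rows.foldl
      (fun acc row =>
        (pvUpd "rating_key" rk acc.1 row, pvUpd "folder" fo acc.2.1 row, pvUpd "tmdb_id" ti acc.2.2 row))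
      (a, b, c)
    = (rows.foldl (pvUpd "rating_key" rk) a,
       rows.foldl (pvUpd "folder" fo) b,
       rows.foldl (pvUpd "tmdb_id" ti) c) := by
  induction rows generalizing a b c with
  | nil => rfl
  | cons r rs ih => simp [List.foldl_cons, ih]

-- once the accumulator is filled the fold never changes it
theorem pvFold_some (rows : List (List (String × String))) (f q : String)
    (m : List (String × String)) :
    rows.foldl (pvUpd f q) (some m) = some m := by
  induction rows with
  | nil => rfl
  | cons r rs ih => simpa [List.foldl_cons, pvUpd] using ih

-- the single-field fold from `none` is the first linear match (for a non-empty query)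
theorem pvFold_eq_find? (rows : List (List (String × String))) (f q : String) :
    rows.foldl (pvUpd f q) none
      = if q ≠ "" then rows.find? (fun row => pvRowKey row f == q) else none := by
  induction rows with
  | nil => simp
  | cons r rs ih =>
    by_cases hq : q = ""
    · subst hq
      simp only [List.foldl_cons, pvUpd]
      simpa using ih
    · by_cases hm : pvRowKey r f = q
      · simp [List.foldl_cons, pvUpd, hq, hm, pvFold_some]
      · simp [List.foldl_cons, pvUpd, hq, hm, ih]

-- a row found by a non-empty query cannot be the empty row
theorem pvFound_not_empty (rows : List (List (String × String))) (field q : String)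
    (hq : q ≠ "") (row : List (String × String))
    (h : rows.find? (fun row => pvRowKey row field == q) = some row) : row.isEmpty = false := by
  have hp := List.find?_some h
  rcases row with _ | _
  · exfalso
    apply hq
    have hk : pvRowKey [] field = q := by simpa using hp
    rw [← hk]
    simp [pvRowKey, PySem.Dict.getD, PySem.Dict.get?]
    decide
  · rfl

-- A's block as a match on the (guarded) first match
theorem pvTryScan_eq (rows : List (List (String × String))) (f q : String)
    (cont : (Option (List (String × String))) × String) :
    pvTryScan rows f q cont
      = match (if q ≠ "" then rows.find? (fun row => pvRowKey row f == q) else none) with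
        | some row => (some row, f)
        | none => cont := by
  by_cases hq : q = ""
  · simp [pvTryScan, hq]
  · rw [pvTryScan]
    cases hfind : rows.find? (fun row => pvRowKey row f == q) with
    | none => simp [hq]
    | some row => simp [hq, pvFound_not_empty rows f q hq row hfind]

-- ===== VERDICT (by name: the statement is the Claim_ definition above) =====
theorem find_row_by_identity_spec : Claim_equal_find_row_by_identity := by
  intro rows rating_key folder tmdb_id _
  unfold Spec_find_row_by_identity find_row_by_identity find_row_by_identity_alt
  simp only [pvFold_proj, pvFold_eq_find?, pvTryScan_eq]
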